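-- pv_equiv track=rewrite | github.com/rlarlgnszx/Coding-Test | 프로그래머스/1/135808. 과일 장수/과일 장수.py | solution
-- ===== SOURCE A (Python) =====
-- def solution(k, m, score):
--     answer = 0
--     # 사과 상태 1~k 점
--     # 한상자에 사과 m개 포장
--     # 상자중 낮은 점수가 p인 경우 사과 한상자 = p*m
--     score.sort()
--     n = len(score)
--     count = n%m
--     ans = 0
--     for i in range(count,n,m):
--         ans += score[i]*m
--     return ans
-- ===== SOURCE B (Python) =====
-- def solution(k, m, score):
--     # one descending pass: every m-th apple (the cheapest of a full box) prices its box
--     total = 0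
--     pos = 0
--     for x in sorted(score, reverse=True):
--         pos += 1
--         if pos % m == 0:
--             total += x * m
--     return total
-- ===== Notes on version B (the rewrite author's own statement) =====
-- stated objective: alternative
-- what changed: A sorts ascending, computes the remainder n%m and sums score[i]*m over an index stride loop range(n%m, n, m); B sorts descending and makes one element pass with a position counter, adding x*m whenever the position is a multiple of m (the cheapest apple of each full box), with no remainder arithmetic and no indexing.
-- outside the precondition, e.g. on solution(0, -2, [1, 2, 3]): A returns 0, B returns -4; on solution(0, 0, [1]): A raises ZeroDivisionError, B raises ZeroDivisionError
import Mathlib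
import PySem

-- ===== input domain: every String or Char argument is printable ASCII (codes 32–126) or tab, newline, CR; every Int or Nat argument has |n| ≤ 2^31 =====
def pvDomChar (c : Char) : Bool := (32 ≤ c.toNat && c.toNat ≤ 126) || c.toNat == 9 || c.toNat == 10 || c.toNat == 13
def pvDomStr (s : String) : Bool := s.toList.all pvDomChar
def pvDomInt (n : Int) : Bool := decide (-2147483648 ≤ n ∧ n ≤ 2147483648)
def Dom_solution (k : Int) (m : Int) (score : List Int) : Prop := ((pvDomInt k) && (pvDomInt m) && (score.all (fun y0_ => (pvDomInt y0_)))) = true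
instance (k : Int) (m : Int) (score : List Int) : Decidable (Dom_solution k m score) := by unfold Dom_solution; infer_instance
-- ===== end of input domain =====

-- B replaces A's remainder arithmetic + index-stride loop over an ascending sort by a single
-- position-counting pass over a descending sort (same O(n log n); objective: alternative).
-- A sorts `score` in place; the equivalence proved here is about the RETURN value only (B does not mutate).


-- ===== PORT A =====
-- (A's local variable `answer` is never used and is dropped.)
def solution (k : Int) (m : Int) (score : List Int) : Int :=
  let s := PySem.List.sorted score (fun x => x) false
  let n : Int := (s.length : Int)
  let count : Int := PySem.Int.mod n m
  (PySem.List.pyRange count n m).foldl (fun ans i => ans + PySem.List.pyGetD s i 0 * m) 0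

-- ===== PORT B =====
def solution_alt (k : Int) (m : Int) (score : List Int) : Int :=
  ((PySem.List.sorted score (fun x => x) true).foldl
    (fun (st : Int × Int) x =>
      let pos := st.2 + 1
      (if PySem.Int.mod pos m = 0 then st.1 + x * m else st.1, pos))
    (0, 0)).1

-- ===== PRECONDITION & SPEC =====
-- Pre_ excludes non-positive box size m, outside the problem's natural domain (m is the number of
-- apples per box): at m = 0 both programs raise (ZeroDivisionError from n%m in A, pos%m in B),
-- and for m < 0 A's returned 0 is the accident of an empty negative-step range.
def Pre_solution (k : Int) (m : Int) (score : List Int) : Prop := 1 ≤ m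
instance (k : Int) (m : Int) (score : List Int) : Decidable (Pre_solution k m score) := by unfold Pre_solution; infer_instance

def pvWitness_solution : Int × Int × List Int := (5, 2, [1, 2, 3])

def Spec_solution (k : Int) (m : Int) (score : List Int) (out : Int) : Prop := out = solution_alt k m score
instance (k : Int) (m : Int) (score : List Int) (out : Int) : Decidable (Spec_solution k m score out) := by unfold Spec_solution; infer_instance

-- ===== CLAIM (what is proved, stated in full; the proofs are below) =====
def Claim_equal_solution : Prop := ∀ (k : Int) (m : Int) (score : List Int), Dom_solution k m score → Pre_solution k m score → Spec_solution k m score (solution k m score)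

-- ===== LEMMAS AND PROOFS =====

-- the running total of B's loop, as a function of the start position
def altSum (m : Int) : Int → List Int → Int
  | _, [] => 0
  | pos, x :: xs => (if PySem.Int.mod (pos + 1) m = 0 then x * m else 0) + altSum m (pos + 1) xs

lemma foldl_altSum (m : Int) (l : List Int) (t p : Int) :
    l.foldl (fun (st : Int × Int) x =>
      let pos := st.2 + 1
      (if PySem.Int.mod pos m = 0 then st.1 + x * m else st.1, pos)) (t, p)
      = (t + altSum m p l, p + l.length) := by
  induction l generalizing t p with
  | nil => simp [altSum]
  | cons x xs ih =>
      simp only [List.foldl_cons, altSum, ih]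
      split_ifs with h <;>
        (rw [Prod.mk.injEq]
         refine ⟨by ring, by simp only [List.length_cons]; push_cast; ring⟩)

lemma altSum_congr (m : Int) (hm : 0 < m) (l : List Int) :
    ∀ p p', PySem.Int.mod p m = PySem.Int.mod p' m → altSum m p l = altSum m p' l := by
  induction l with
  | nil => intro p p' _; rfl
  | cons x xs ih =>
      intro p p' h
      rw [PySem.Int.mod_eq_emod_of_pos hm, PySem.Int.mod_eq_emod_of_pos hm] at h
      have h1 : PySem.Int.mod (p + 1) m = PySem.Int.mod (p' + 1) m := by
        rw [PySem.Int.mod_eq_emod_of_pos hm, PySem.Int.mod_eq_emod_of_pos hm,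
          Int.add_emod, Int.add_emod p' 1 m, h]
      simp only [altSum, h1, ih _ _ h1]

lemma altSum_append (m : Int) (u v : List Int) :
    ∀ p, altSum m p (u ++ v) = altSum m p u + altSum m (p + u.length) v := by
  induction u with
  | nil => intro p; simp [altSum]
  | cons x xs ih =>
      intro p
      simp only [List.cons_append, altSum, ih (p + 1), List.length_cons]
      push_cast
      ring_nf

lemma altSum_short (m : Int) (hm : 0 < m) :
    ∀ (l : List Int) (p : Int), 0 ≤ p → p + l.length < m → altSum m p l = 0 := by
  intro l
  induction l with
  | nil => intro p _ _; rfl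
  | cons x xs ih =>
      intro p hp hlt
      have hlen : (0 : Int) ≤ xs.length := by positivity
      have hmod : PySem.Int.mod (p + 1) m = p + 1 := by
        rw [PySem.Int.mod_eq_emod_of_pos hm]
        apply Int.emod_eq_of_lt (by omega)
        simp only [List.length_cons] at hlt; push_cast at hlt; omega
      have hne : PySem.Int.mod (p + 1) m ≠ 0 := by rw [hmod]; omega
      simp only [altSum, if_neg hne, zero_add]
      apply ih (p + 1) (by omega)
      simp only [List.length_cons] at hlt; push_cast at hlt ⊢; omega

lemma altSum_full (m : Int) (hm : 0 < m) :
    ∀ (l : List Int) (p : Int), 0 ≤ p → p + l.length = m → l ≠ [] →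
      altSum m p l = l.getD (l.length - 1) 0 * m := by
  intro l
  induction l with
  | nil => intro p _ _ hne; exact absurd rfl hne
  | cons x xs ih =>
      intro p hp heq _
      cases xs with
      | nil =>
          simp only [List.length_cons, List.length_nil] at heq
          push_cast at heq
          have : p + 1 = m := by omega
          simp [altSum, PySem.Int.mod_eq_emod_of_pos hm, this]
      | cons y ys =>
          have hlt : p + 1 < m := by
            simp only [List.length_cons] at heq; push_cast at heq
            have : (0 : Int) ≤ ys.length := by positivity
            omega
          have hmod : PySem.Int.mod (p + 1) m = p + 1 := by
            rw [PySem.Int.mod_eq_emod_of_pos hm]; exact Int.emod_eq_of_lt (by omega) hlt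
          have hne : PySem.Int.mod (p + 1) m ≠ 0 := by rw [hmod]; omega
          have hrec := ih (p + 1) (by omega)
            (by simp only [List.length_cons] at heq ⊢; push_cast at heq ⊢; omega) (by simp)
          rw [show altSum m p (x :: y :: ys)
              = (if PySem.Int.mod (p + 1) m = 0 then x * m else 0) + altSum m (p + 1) (y :: ys)
              from rfl, if_neg hne, zero_add, hrec]
          simp only [List.length_cons, Nat.add_sub_cancel, List.getD_cons_succ]

-- splitting A's stride range at its top element
lemma pyRange_mod_split (m N : Int) (hm : 0 < m) (hmn : m ≤ N) :
    PySem.List.pyRange (PySem.Int.mod N m) N m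
      = PySem.List.pyRange (PySem.Int.mod N m) (N - m) m ++ [N - m] := by
  rw [PySem.Int.mod_eq_emod_of_pos hm]
  rw [PySem.List.pyRange_of_pos _ _ hm, PySem.List.pyRange_of_pos _ _ hm]
  have h1 : 0 ≤ N % m := Int.emod_nonneg N (by omega)
  have h2 : N % m < m := Int.emod_lt_of_pos N hm
  have hNd : m * (N / m) + N % m = N := Int.mul_ediv_add_emod N m
  obtain ⟨c, hcdef⟩ : ∃ t, t = N % m := ⟨_, rfl⟩
  rw [← hcdef] at h1 h2 hNd ⊢
  obtain ⟨d, hddef⟩ : ∃ t, t = N / m := ⟨_, rfl⟩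
  rw [← hddef] at hNd
  clear hcdef hddef
  have hd1 : 1 ≤ d := by
    by_contra hcon
    have hd0 : d ≤ 0 := by omega
    have : m * d ≤ 0 := by nlinarith
    omega
  have hmd : d * m = m * d := mul_comm d m
  have hmd1 : (d - 1) * m = m * d - m := by ring
  have hmd1' : m * (d - 1) = m * d - m := by ring
  have hq1 : (N - c + m - 1) / m = d := by
    have : N - c + m - 1 = (m - 1) + d * m := by omega
    rw [this, Int.add_mul_ediv_right _ _ (by omega : m ≠ 0),
      Int.ediv_eq_zero_of_lt (by omega) (by omega)]
    omega
  have hq2 : (N - m - c + m - 1) / m = d - 1 := by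
    have : N - m - c + m - 1 = (m - 1) + (d - 1) * m := by omega
    rw [this, Int.add_mul_ediv_right _ _ (by omega : m ≠ 0),
      Int.ediv_eq_zero_of_lt (by omega) (by omega)]
    omega
  have hcN : c < N := by omega
  rw [if_pos hcN, hq1]
  by_cases hdd : 1 < d
  · have hpos : 0 < m * (d - 1) := mul_pos hm (by omega)
    have hclt : c < N - m := by omega
    rw [if_pos hclt, hq2]
    have htn : d.toNat = (d - 1).toNat + 1 := by omega
    rw [htn, List.range_succ, List.map_append]
    congr 1
    simp only [List.map_cons, List.map_nil]
    congr 1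
    have : ((d - 1).toNat : Int) = d - 1 := by omega
    rw [this]; linear_combination hNd + hmd1'
  · have hdeq : d = 1 := by omega
    rw [hdeq] at hNd
    have hcge : ¬ c < N - m := by omega
    rw [if_neg hcge]
    have : d.toNat = 1 := by omega
    rw [this]
    simp only [List.range_one, List.map_cons, List.map_nil]
    congr 1
    push_cast
    linear_combination hNd

-- the two loops compute the same value, for ANY list s (sortedness is not needed)
lemma main_eq (m : Int) (hm : 0 < m) :
    ∀ (n : Nat) (s : List Int), s.length = n →
      (PySem.List.pyRange (PySem.Int.mod (s.length : Int) m) (s.length : Int) m).foldl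
          (fun ans i => ans + PySem.List.pyGetD s i 0 * m) 0
        = altSum m 0 s.reverse := by
  intro n
  induction n using Nat.strong_induction_on with
  | _ n ih =>
    intro s hs
    by_cases hsmall : (s.length : Int) < m
    · have hmod : PySem.Int.mod (s.length : Int) m = (s.length : Int) := by
        rw [PySem.Int.mod_eq_emod_of_pos hm]
        exact Int.emod_eq_of_lt (by positivity) hsmall
      rw [hmod]
      rw [PySem.List.pyRange_of_pos _ _ hm, if_neg (lt_irrefl _)]
      simp only [List.range_zero, List.map_nil, List.foldl_nil]
      rw [altSum_short m hm s.reverse 0 le_rfl (by simpa using hsmall)]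
    · -- m ≤ s.length : peel the top box
      rw [not_lt] at hsmall
      have hmN : m ≤ (s.length : Int) := hsmall
      set N := (s.length : Int) with hN
      have hM : m.toNat ≤ s.length := by omega
      set n' : Nat := s.length - m.toNat with hn'
      have hNm : N - m = (n' : Int) := by omega
      rw [pyRange_mod_split m N hm hmN]
      rw [PySem.List.foldl_add, List.map_append, List.sum_append]
      simp only [List.map_cons, List.map_nil, List.sum_cons, List.sum_nil]
      -- rewrite the inner range as the range of s' := s.take n'
      set s' := s.take n' with hs'
      have hlen' : s'.length = n' := by simp [hs', hn']
      have hmodeq : PySem.Int.mod N m = PySem.Int.mod ((s'.length : Int)) m := by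
        rw [hlen', PySem.Int.mod_eq_emod_of_pos hm, PySem.Int.mod_eq_emod_of_pos hm, ← hNm]
        conv_lhs => rw [show N = (N - m) + m * 1 by ring]
        rw [Int.add_mul_emod_self_left]
      have hmap : (PySem.List.pyRange (PySem.Int.mod N m) (N - m) m).map
            (fun i => PySem.List.pyGetD s i 0 * m)
          = (PySem.List.pyRange (PySem.Int.mod ((s'.length : Int)) m) ((s'.length : Int)) m).map
            (fun i => PySem.List.pyGetD s' i 0 * m) := by
        rw [← hmodeq, hlen', ← hNm]
        apply List.map_congr_left
        intro i hi
        rw [PySem.List.mem_pyRange_iff_of_pos hm] at hi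
        obtain ⟨hi1, hi2, _⟩ := hi
        have hi0 : 0 ≤ i := le_trans (by rw [PySem.Int.mod_eq_emod_of_pos hm]; exact Int.emod_nonneg N (by omega)) hi1
        have hilt : i < N - m := hi2
        have hitn : i.toNat < n' := by omega
        rw [PySem.List.pyGetD_eq_getElem s 0 hi0 (by omega),
          PySem.List.pyGetD_eq_getElem s' 0 hi0 (by rw [hlen']; exact_mod_cast by omega)]
        simp only [hs', List.getElem_take]
      rw [hmap]
      -- apply the induction hypothesis to s'
      have hlt : n' < n := by omega
      have ihs := ih n' hlt s' hlen'
      rw [PySem.List.foldl_add] at ihs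
      simp only [zero_add] at ihs
      rw [ihs]
      -- now the B side
      have hsplit : s.reverse = (s.drop n').reverse ++ s'.reverse := by
        rw [hs', ← List.reverse_append, List.take_append_drop]
      have hwlen : (s.drop n').reverse.length = m.toNat := by
        simp [List.length_drop, hn']; omega
      rw [hsplit, altSum_append, hwlen]
      have hcong : altSum m (0 + (m.toNat : Int)) s'.reverse = altSum m 0 s'.reverse := by
        apply altSum_congr m hm
        rw [PySem.Int.mod_eq_emod_of_pos hm, PySem.Int.mod_eq_emod_of_pos hm]
        simp [show ((m.toNat : Int)) = m by omega]
      rw [hcong]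
      have hwne : (s.drop n').reverse ≠ [] := by
        intro hcontra
        have := congrArg List.length hcontra
        rw [hwlen] at this
        simp at this
        omega
      rw [altSum_full m hm (s.drop n').reverse 0 le_rfl (by rw [hwlen]; omega) hwne]
      -- identify the two picked elements
      have hidx : (s.drop n').reverse.getD ((s.drop n').reverse.length - 1) 0
          = PySem.List.pyGetD s (N - m) 0 := by
        rw [hwlen]
        have h1 : m.toNat - 1 < (s.drop n').reverse.length := by rw [hwlen]; omega
        rw [List.getD_eq_getElem _ _ h1]
        rw [List.getElem_reverse]
        rw [List.getElem_drop]
        rw [PySem.List.pyGetD_eq_getElem s 0 (by omega) (by omega)]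
        congr 1
        simp [List.length_drop, hn'] at *
        omega
      rw [hidx]
      ring

-- Python's sorted(xs, reverse=True) on Ints is the reverse of sorted(xs)
lemma sorted_desc_eq_reverse (xs : List Int) :
    PySem.List.sorted xs (fun x => x) true = (PySem.List.sorted xs (fun x => x) false).reverse := by
  apply PySem.List.eq_of_perm_of_pairwise_le_of_injective (key := fun x : Int => -x) neg_injective
  · exact (PySem.List.sorted_perm xs (fun x => x) true).trans
      ((PySem.List.sorted_perm xs (fun x => x) false).symm.trans
        (List.reverse_perm _).symm)
  · exact (PySem.List.sorted_pairwise_rev xs (fun x => x)).imp (by intro a b h; omega)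
  · rw [List.pairwise_reverse]
    exact (PySem.List.sorted_pairwise xs (fun x => x)).imp (by intro a b h; omega)

-- ===== VERDICT (by name: the statement is the Claim_ definition above) =====
theorem solution_spec : Claim_equal_solution := by
  intro k m score _ hpre
  unfold Spec_solution solution solution_alt
  rw [sorted_desc_eq_reverse, foldl_altSum]
  simp only [zero_add]
  exact main_eq m (by exact hpre) _ (PySem.List.sorted score (fun x => x) false) rfl
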